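-- pv_equiv track=rewrite | github.com/gcholette/Forecast | src/util.py | reorder_data
-- ===== SOURCE A (Python) =====
-- def reorder_data(xs, N, M):
--   n = int(M / N)
--   indexes = []
--   for I in list(range(0, n)):
--     for i in list(range(0, N)):
--       indexes.append(int((i * n) + I))
--
--   reordered = list(range(0, M))
--   for j, i in zip(indexes, range(0, len(indexes))):
--     reordered[i] = xs[j]
--   return reordered
-- ===== SOURCE B (Python) =====
-- def reorder_data(xs, N, M):
--     n = int(M / N)
--     if n <= 0 or N <= 0:
--         return list(range(0, M))
--     blocks = [xs[i * n:(i + 1) * n] for i in range(N)]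
--     head = [x for row in zip(*blocks) for x in row]
--     return head + list(range(n * N, M))
-- ===== Notes on version B (the rewrite author's own statement) =====
-- stated objective: alternative
-- what changed: Replaces A's index-list construction plus in-place assignment loop over a preallocated range by slicing xs into N consecutive blocks and transposing them with zip, appending the untouched range tail.
import Mathlib
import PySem

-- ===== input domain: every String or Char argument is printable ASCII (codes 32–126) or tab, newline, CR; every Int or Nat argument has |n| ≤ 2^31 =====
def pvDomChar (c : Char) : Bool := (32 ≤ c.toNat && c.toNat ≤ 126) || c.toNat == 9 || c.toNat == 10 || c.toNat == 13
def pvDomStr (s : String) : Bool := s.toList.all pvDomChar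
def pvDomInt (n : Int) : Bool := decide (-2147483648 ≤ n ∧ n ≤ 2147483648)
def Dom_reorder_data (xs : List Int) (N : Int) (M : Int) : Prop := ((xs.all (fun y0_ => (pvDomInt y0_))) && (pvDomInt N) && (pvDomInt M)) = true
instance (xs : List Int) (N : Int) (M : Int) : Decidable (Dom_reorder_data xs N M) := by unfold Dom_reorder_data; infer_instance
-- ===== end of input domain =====

-- B reorders by slicing xs into blocks and transposing them with zip instead of A's
-- index-list + in-place assignment loop; equivalence is proved on Pre_ (where A returns).

-- ===== PORT A =====
-- int(M / N) is exact truncating division for |M|,|N| ≤ 2^31 (PySem.Int.truncdiv).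
def reorder_data (xs : List Int) (N : Int) (M : Int) : List Int :=
  let n := PySem.Int.truncdiv M N
  let indexes : List Int :=
    (PySem.List.pyRange 0 n 1).foldl (fun acc I =>
      (PySem.List.pyRange 0 N 1).foldl (fun acc2 i => acc2 ++ [i * n + I]) acc) []
  let reordered := PySem.List.pyRange 0 M 1
  (indexes.zip (PySem.List.pyRange 0 (indexes.length : Int) 1)).foldl
    (fun acc ji => PySem.List.pySetD acc ji.2 (PySem.List.pyGetD xs ji.1 0)) reordered

-- ===== PORT B =====
-- zip(*blocks): rows up to the minimum block length; each row is the I-th element of every block.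
def pyZipStar (bs : List (List Int)) : List (List Int) :=
  match bs with
  | [] => []
  | b0 :: rest =>
    let k := rest.foldl (fun m b => min m b.length) b0.length
    (List.range k).map (fun I => bs.map (fun b => b.getD I 0))

def reorder_data_alt (xs : List Int) (N : Int) (M : Int) : List Int :=
  let n := PySem.Int.truncdiv M N
  if n ≤ 0 ∨ N ≤ 0 then PySem.List.pyRange 0 M 1
  else
    let blocks := (PySem.List.pyRange 0 N 1).map
      (fun i => PySem.List.slice xs (some (i * n)) (some ((i + 1) * n)))
    let head := (pyZipStar blocks).flatten
    head ++ PySem.List.pyRange (n * N) M 1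

-- ===== PRECONDITION & SPEC =====
-- Pre_ excludes exactly the inputs where A raises: N = 0 (ZeroDivisionError) and,
-- when 0 < N and 0 < int(M/N), lists xs shorter than int(M/N)*N (IndexError in xs[j]).
def Pre_reorder_data (xs : List Int) (N : Int) (M : Int) : Prop :=
  N ≠ 0 ∧ (0 < N → 0 < PySem.Int.truncdiv M N →
    PySem.Int.truncdiv M N * N ≤ (xs.length : Int))
instance (xs : List Int) (N : Int) (M : Int) : Decidable (Pre_reorder_data xs N M) := by
  unfold Pre_reorder_data; infer_instance
def pvWitness_reorder_data : List Int × Int × Int := ([10, 20, 30, 40, 50, 60], 2, 7)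

def Spec_reorder_data (xs : List Int) (N : Int) (M : Int) (out : List Int) : Prop := out = reorder_data_alt xs N M
instance (xs : List Int) (N : Int) (M : Int) (out : List Int) : Decidable (Spec_reorder_data xs N M out) := by unfold Spec_reorder_data; infer_instance

-- ===== CLAIM (what is proved, stated in full; the proofs are below) =====
def Claim_equal_reorder_data : Prop := ∀ (xs : List Int) (N : Int) (M : Int), Dom_reorder_data xs N M → Pre_reorder_data xs N M → Spec_reorder_data xs N M (reorder_data xs N M)

-- ===== LEMMAS AND PROOFS =====

-- The nested append loop builds the flat list of source indices.
theorem indexes_eq (n N : Int) :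
    (PySem.List.pyRange 0 n 1).foldl (fun acc I =>
      (PySem.List.pyRange 0 N 1).foldl (fun acc2 i => acc2 ++ [i * n + I]) acc) []
    = (PySem.List.pyRange 0 n 1).flatMap
        (fun I => (PySem.List.pyRange 0 N 1).map (fun i => i * n + I)) := by
  rw [List.flatMap_eq_foldl]
  exact PySem.List.foldl_congr_mem _ _ _ _ (fun acc I _ =>
    PySem.List.foldl_append_singleton_eq_map _ _ _)

-- The assignment loop 'for j, i in zip(js, range(s, s+len)): r[i] = f(j)'
-- overwrites the segment [s, s+len) of r with js.map f.
theorem writeLoop (f : Int → Int) (js : List Int) (s : Nat) (r : List Int)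
    (h : s + js.length ≤ r.length) :
    (js.zip (PySem.List.pyRange (s : Int) ((s : Int) + (js.length : Int)) 1)).foldl
      (fun acc ji => PySem.List.pySetD acc ji.2 (f ji.1)) r
    = r.take s ++ js.map f ++ r.drop (s + js.length) := by
  induction js generalizing s r with
  | nil => simp
  | cons j js ih =>
    have hs : s < r.length := by simp at h; omega
    rw [PySem.List.pyRange_one_cons (by simp only [List.length_cons]; push_cast; omega)]
    simp only [List.zip_cons_cons, List.foldl_cons]
    rw [show ((s : Int) + ((j :: js).length : Int)) = ((s + 1 : Nat) : Int) + (js.length : Int) by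
      simp; omega, show ((s : Int) + 1) = ((s + 1 : Nat) : Int) by omega]
    rw [show PySem.List.pySetD r (s : Int) (f j) = r.set s (f j) from
      PySem.List.pySetD_natCast r s (f j)]
    rw [ih (s + 1) (r.set s (f j)) (by simp at h ⊢; omega)]
    rw [List.take_set, List.drop_set_of_lt (by omega)]
    have htake : (r.take (s + 1)).set s (f j) = r.take s ++ [f j] := by
      rw [List.set_eq_take_append_cons_drop]
      simp [List.take_take, hs]
    rw [htake]
    simp [List.append_assoc]
    rw [show s + 1 + js.length = s + (js.length + 1) by omega]

-- Dropping the written prefix of list(range(0, M)) leaves list(range(k, M)).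
theorem drop_pyRange (k : Nat) (M : Int) (h : (k : Int) ≤ M) :
    (PySem.List.pyRange 0 M 1).drop k = PySem.List.pyRange (k : Int) M 1 := by
  rw [PySem.List.pyRange_one_append 0 (k : Int) M (by omega) h]
  rw [List.drop_append_of_le_length (by simp [PySem.List.length_pyRange_one])]
  simp [PySem.List.length_pyRange_one]

-- foldl of min over equal-length blocks.
theorem foldl_min_const (l : List (List Int)) (c : Nat) (hall : ∀ b ∈ l, b.length = c) :
    l.foldl (fun m b => min m b.length) c = c := by
  induction l with
  | nil => rfl
  | cons b l ih =>
    simp only [List.foldl_cons, hall b List.mem_cons_self, min_self]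
    exact ih (fun b hb => hall b (List.mem_cons_of_mem _ hb))

theorem writeLoop0 (f : Int → Int) (js : List Int) (r : List Int)
    (h : js.length ≤ r.length) :
    (js.zip (PySem.List.pyRange 0 (js.length : Int) 1)).foldl
      (fun acc ji => PySem.List.pySetD acc ji.2 (f ji.1)) r
    = js.map f ++ r.drop js.length := by
  have := writeLoop f js 0 r (by simpa)
  simpa using this

-- zip(*bs) over nonempty equal-length blocks: one row per position.
theorem pyZipStar_const_len (bs : List (List Int)) (c : Nat) (hne : bs ≠ [])
    (hall : ∀ b ∈ bs, b.length = c) :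
    pyZipStar bs = (List.range c).map (fun I => bs.map (fun b => b.getD I 0)) := by
  cases bs with
  | nil => simp at hne
  | cons b0 rest =>
    simp only [pyZipStar]
    rw [hall b0 List.mem_cons_self,
      foldl_min_const rest c (fun b hb => hall b (List.mem_cons_of_mem _ hb))]

-- ===== VERDICT (by name: the statement is the Claim_ definition above) =====
theorem reorder_data_spec : Claim_equal_reorder_data := by
  intro xs N M _ hpre
  obtain ⟨hN0, hlen⟩ := hpre
  unfold Spec_reorder_data reorder_data reorder_data_alt
  simp only []
  set n := PySem.Int.truncdiv M N with hn
  rw [indexes_eq]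
  by_cases hcase : n ≤ 0 ∨ N ≤ 0
  · have hidx : (PySem.List.pyRange 0 n 1).flatMap
        (fun I => (PySem.List.pyRange 0 N 1).map (fun i => i * n + I)) = [] := by
      rcases hcase with h | h
      · rw [show PySem.List.pyRange 0 n 1 = [] from
          PySem.List.pyRange_one_eq_nil (by omega)]
        rfl
      · simp [PySem.List.pyRange_one_eq_nil (by omega : N ≤ (0:Int))]
    rw [hidx, if_pos hcase]
    rfl
  · push Not at hcase
    obtain ⟨hnpos, hNpos⟩ := hcase
    rw [if_neg (by push Not; exact ⟨hnpos, hNpos⟩)]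
    have hxlen : n * N ≤ (xs.length : Int) := hlen hNpos hnpos
    have hMpos : 0 < M := by
      by_contra hM
      have : (0:Int) ≤ (-M).tdiv N := Int.tdiv_nonneg (by omega) (by omega)
      rw [Int.neg_tdiv] at this
      have : n ≤ 0 := by simp only [hn, PySem.Int.truncdiv] at *; omega
      omega
    have hnN_M : n * N ≤ M := by
      have he : n = M / N := by
        simp only [hn, PySem.Int.truncdiv]
        exact Int.tdiv_eq_ediv_of_nonneg (by omega)
      have h1 := Int.emod_nonneg M (by omega : N ≠ 0)
      have h2 := Int.mul_ediv_add_emod M N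
      nlinarith [he, h1, h2]
    set idxs := (PySem.List.pyRange 0 n 1).flatMap
        (fun I => (PySem.List.pyRange 0 N 1).map (fun i => i * n + I)) with hidxs
    have hLen : idxs.length = (n * N).toNat := by
      rw [hidxs, List.length_flatMap, Int.toNat_mul (by omega) (by omega)]
      simp [PySem.List.length_pyRange_one, List.map_const', Nat.mul_comm]
    have hblock_len : ∀ i : Int, 0 ≤ i → i < N →
        (PySem.List.slice xs (some (i * n)) (some ((i + 1) * n))).length = n.toNat := by
      intro i h0 hiN
      have hmul : (0:Int) ≤ i * n := mul_nonneg h0 (by omega)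
      have hup : (i + 1) * n ≤ n * N := by nlinarith
      rw [PySem.List.slice_toNat _ hmul (by nlinarith)]
      have hexp : (i + 1) * n = i * n + n := by ring
      simp [List.length_take, List.length_drop]
      omega
    have hcell : ∀ i : Int, 0 ≤ i → i < N → ∀ I : Nat, I < n.toNat →
        (PySem.List.slice xs (some (i * n)) (some ((i + 1) * n))).getD I 0
          = PySem.List.pyGetD xs (i * n + (I : Int)) 0 := by
      intro i h0 hiN I hI
      have hmul : (0:Int) ≤ i * n := mul_nonneg h0 (by omega)
      have hup : (i + 1) * n ≤ n * N := by nlinarith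
      have hexp : (i + 1) * n = i * n + n := by ring
      have hinlen : i * n + (I : Int) < (xs.length : Int) := by omega
      rw [PySem.List.slice_toNat _ hmul (by nlinarith)]
      rw [PySem.List.pyGetD_eq_getElem xs 0 (by omega) hinlen]
      rw [List.getD_eq_getElem?_getD, List.getElem?_take, if_pos (by omega),
        List.getElem?_drop]
      rw [List.getElem?_eq_getElem (by omega)]
      simp only [Option.getD_some]
      congr 1
      omega
    -- A side: write loop fills the prefix
    rw [writeLoop0 (fun j => PySem.List.pyGetD xs j 0) idxs (PySem.List.pyRange 0 M 1)
      (by rw [hLen, PySem.List.length_pyRange_one]; omega)]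
    -- B side: zip(*blocks) rows
    rw [pyZipStar_const_len _ n.toNat
      (by
        have hmem : (0:Int) ∈ PySem.List.pyRange 0 N 1 := by
          rw [PySem.List.mem_pyRange_one]; omega
        intro hc
        rw [List.map_eq_nil_iff] at hc
        rw [hc] at hmem
        simp at hmem)
      (by
        intro b hb
        rw [List.mem_map] at hb
        obtain ⟨i, hi, rfl⟩ := hb
        rw [PySem.List.mem_pyRange_one] at hi
        exact hblock_len i hi.1 hi.2)]
    -- tail
    have htail : (PySem.List.pyRange 0 M 1).drop idxs.length
        = PySem.List.pyRange (n * N) M 1 := by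
      rw [hLen, drop_pyRange (n * N).toNat M (by omega),
        Int.toNat_of_nonneg (by positivity : (0:Int) ≤ n * N)]
    rw [htail]
    -- heads
    congr 1
    rw [hidxs, List.map_flatMap, ← List.flatMap_def,
      PySem.List.pyRange_zero, PySem.List.pyRange_zero, List.flatMap_map]
    refine List.flatMap_congr ?_
    intro I hI
    rw [List.mem_range] at hI
    simp only [List.map_map]
    refine List.map_congr_left ?_
    intro k hk
    rw [List.mem_range] at hk
    simp only [Function.comp_apply]
    exact (hcell (k : Int) (by omega) (by omega) I hI).symm
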